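-- pv_equiv track=rewrite | github.com/MatchaDesu/PSCP | 098_PhoneNumber.py | dom
-- ===== SOURCE A (Python) =====
-- def dom(number) :
--     "Turn number into Domestic"
--     msg = ""
--     if len(number) < 10 :
--         for i,char in enumerate(number) :
--             if i in (1,5) :
--                 msg += f" {char}"
--             else :
--                 msg += char
--     else :
--         for i,char in enumerate(number) :
--             if i in (2,6) :
--                 msg += f" {char}"
--             else :
--                 msg += char
--     return msg
-- ===== SOURCE B (Python) =====
-- def dom(number):
--     "Turn number into Domestic"
--     n = len(number)
--     cuts = (1, 5) if n < 10 else (2, 6)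
--     ks = [0] + [c for c in cuts if c < n] + [n]
--     return " ".join(number[a:b] for a, b in zip(ks, ks[1:]))
-- ===== Notes on version B (the rewrite author's own statement) =====
-- stated objective: simpler
-- what changed: B computes the partition boundaries up front (cut positions chosen by length, kept only when inside the string) and joins the resulting slices with spaces, instead of A's character-by-character accumulating loop with per-index membership tests; the bulk slicing also avoids A's per-character string concatenation.
import Mathlib
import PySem

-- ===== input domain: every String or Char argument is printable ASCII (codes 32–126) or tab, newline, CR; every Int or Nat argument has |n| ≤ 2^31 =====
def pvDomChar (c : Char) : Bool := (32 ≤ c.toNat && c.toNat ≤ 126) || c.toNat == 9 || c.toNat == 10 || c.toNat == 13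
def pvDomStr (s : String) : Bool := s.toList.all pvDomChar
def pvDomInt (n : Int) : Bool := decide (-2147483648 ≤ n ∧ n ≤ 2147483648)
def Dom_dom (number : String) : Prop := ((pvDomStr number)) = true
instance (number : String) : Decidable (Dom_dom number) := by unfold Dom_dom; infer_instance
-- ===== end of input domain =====

-- B computes the partition boundaries up front and joins slices with spaces, instead of
-- A's character-by-character accumulating loop (objective: simpler).

-- ===== PORT A =====
-- literal port of A: an accumulating loop over enumerate(number), inserting " " before
-- the char at the positions (1,5) (len < 10) or (2,6) (otherwise)
def dom (number : String) : String :=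
  let cs := number.toList
  if cs.length < 10 then
    String.ofList ((PySem.List.enumerate cs 0).foldl
      (fun msg ic => if ic.1 = 1 ∨ ic.1 = 5 then msg ++ [' ', ic.2] else msg ++ [ic.2]) [])
  else
    String.ofList ((PySem.List.enumerate cs 0).foldl
      (fun msg ic => if ic.1 = 2 ∨ ic.1 = 6 then msg ++ [' ', ic.2] else msg ++ [ic.2]) [])

-- ===== PORT B =====
-- literal port of B: boundaries [0] ++ kept cuts ++ [n]; join the consecutive slices with " "
def dom_alt (number : String) : String :=
  let cs := number.toList
  let n : Int := cs.length
  let cuts : List Int := if n < 10 then [1, 5] else [2, 6]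
  let ks : List Int := [0] ++ cuts.filter (· < n) ++ [n]
  String.ofList (PySem.Chars.join [' ']
    ((ks.zip ks.tail).map (fun ab => PySem.List.slice cs (some ab.1) (some ab.2))))

-- ===== PRECONDITION & SPEC =====
def Spec_dom (number : String) (out : String) : Prop := out = dom_alt number
instance (number : String) (out : String) : Decidable (Spec_dom number out) := by unfold Spec_dom; infer_instance

-- ===== CLAIM (what is proved, stated in full; the proofs are below) =====
def Claim_equal_dom : Prop := ∀ (number : String), Dom_dom number → Spec_dom number (dom number)

-- ===== LEMMAS AND PROOFS =====

-- after index 6 neither branch inserts a space: the fold just appends the remaining chars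
lemma foldl_tail_append (rest : List Char) (acc : List Char) (k : Int) (hk : 7 ≤ k) :
    (PySem.List.enumerate rest k).foldl
      (fun msg ic => if ic.1 = 2 ∨ ic.1 = 6 then msg ++ [' ', ic.2] else msg ++ [ic.2]) acc
      = acc ++ rest := by
  induction rest generalizing acc k with
  | nil => simp [PySem.List.enumerate]
  | cons x xs ih =>
    rw [PySem.List.enumerate_cons, List.foldl_cons]
    have h2 : ¬((k : Int) = 2 ∨ (k : Int) = 6) := by omega
    rw [if_neg h2, ih (acc ++ [x]) (k + 1) (by omega)]
    simp

theorem dom_spec : Claim_equal_dom := by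
  intro number _
  show dom number = dom_alt number
  unfold dom dom_alt
  generalize number.toList = cs
  by_cases h : cs.length < 10
  · -- length ≤ 9: finitely many shapes, each side computes to the same literal
    simp only [if_pos h, if_pos (by exact_mod_cast h : (cs.length : Int) < 10)]
    match cs, h with
    | [], _ => rfl
    | [a], _ => rfl
    | [a,b], _ => rfl
    | [a,b,c], _ => rfl
    | [a,b,c,d], _ => rfl
    | [a,b,c,d,e], _ => rfl
    | [a,b,c,d,e,f], _ => rfl
    | [a,b,c,d,e,f,g], _ => rfl
    | [a,b,c,d,e,f,g,i], _ => rfl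
    | [a,b,c,d,e,f,g,i,j], _ => rfl
    | a::b::c::d::e::f::g::i::j::k::rest, h => simp at h; omega
  · simp only [if_neg h, if_neg (by exact_mod_cast h : ¬ ((cs.length : Int) < 10))]
    match cs, h with
    | [], h | [a], h | [a,b], h | [a,b,c], h | [a,b,c,d], h | [a,b,c,d,e], h
    | [a,b,c,d,e,f], h =>
      exact absurd (by simp) h
    | a::b::c::d::e::f::g::rest, h =>
      simp only [List.length_cons, not_lt] at h
      congr 1
      rw [show (a::b::c::d::e::f::g::rest : List Char) = [a,b,c,d,e,f,g] ++ rest from rfl,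
          PySem.List.enumerate_append]
      norm_num [PySem.List.enumerate_cons, PySem.List.enumerate_nil]
      rw [foldl_tail_append rest [a, b, ' ', c, d, e, f, ' ', g] 7 (by omega)]
      -- B side
      have d2 : decide ((2:Int) ≤ ↑rest.length + 1 + 1 + 1 + 1 + 1 + 1) = true :=
        decide_eq_true (by omega)
      have d6 : decide ((6:Int) ≤ ↑rest.length + 1 + 1 + 1 + 1 + 1 + 1) = true :=
        decide_eq_true (by omega)
      have h3 : PySem.List.slice (a::b::c::d::e::f::g::rest)
          (some 6) (some ((rest.length:Int) + 1 + 1 + 1 + 1 + 1 + 1 + 1)) = g :: rest := by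
        rw [PySem.List.slice_toNat (ha := by omega) (hb := by positivity)]
        have ht : ((rest.length : Int) + 1 + 1 + 1 + 1 + 1 + 1 + 1).toNat = rest.length + 7 := by
          omega
        rw [ht]
        simp [List.take_of_length_le]
      have s1 : PySem.List.slice (a::b::c::d::e::f::g::rest) (some 0) (some 2) = [a, b] := by
        rw [PySem.List.slice_toNat (ha := by omega) (hb := by omega)]; rfl
      have s2 : PySem.List.slice (a::b::c::d::e::f::g::rest) (some 2) (some 6) = [c, d, e, f] := by
        rw [PySem.List.slice_toNat (ha := by omega) (hb := by omega)]; rfl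
      simp only [List.filter_cons, List.filter_nil, d2, d6, if_true, List.cons_append,
        List.nil_append, List.zip_cons_cons, List.zip_nil_right, List.map_cons, List.map_nil,
        h3, s1, s2]
      simp [PySem.Chars.join, List.intercalate]
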